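-- pv_equiv track=rewrite | github.com/anupyadav27/threat-engine | scripts/generate_resource_inventory_all_csp.py | has_id_field
-- ===== SOURCE A (Python) =====
-- from typing import Dict, List, Any, Optional, Set
--
-- def has_id_field(item_fields: Dict, id_patterns: List[str]) -> bool:
--     """Check if item_fields contain a resource identifier field."""
--     if not item_fields:
--         return False
--     field_names = set(item_fields.keys())
--     for pattern in id_patterns:
--         if pattern in field_names:
--             return True
--         for fn in field_names:
--             if fn.lower() == pattern.lower():
--                 return True
--     return False
-- ===== SOURCE B (Python) =====
-- def has_id_field(item_fields, id_patterns):
--     """Check if item_fields contain a resource identifier field."""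
--     if not item_fields:
--         return False
--     lowered_names = {fn.lower() for fn in item_fields}
--     lowered_patterns = {p.lower() for p in id_patterns}
--     return not lowered_names.isdisjoint(lowered_patterns)
-- ===== Notes on version B (the rewrite author's own statement) =====
-- stated objective: simpler
-- what changed: B normalises both the field names and the patterns into two lowercased sets built once and answers with a single set-disjointness test, removing A's nested per-pattern scan over the field names and its redundant exact-match branch.
import Mathlib
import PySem

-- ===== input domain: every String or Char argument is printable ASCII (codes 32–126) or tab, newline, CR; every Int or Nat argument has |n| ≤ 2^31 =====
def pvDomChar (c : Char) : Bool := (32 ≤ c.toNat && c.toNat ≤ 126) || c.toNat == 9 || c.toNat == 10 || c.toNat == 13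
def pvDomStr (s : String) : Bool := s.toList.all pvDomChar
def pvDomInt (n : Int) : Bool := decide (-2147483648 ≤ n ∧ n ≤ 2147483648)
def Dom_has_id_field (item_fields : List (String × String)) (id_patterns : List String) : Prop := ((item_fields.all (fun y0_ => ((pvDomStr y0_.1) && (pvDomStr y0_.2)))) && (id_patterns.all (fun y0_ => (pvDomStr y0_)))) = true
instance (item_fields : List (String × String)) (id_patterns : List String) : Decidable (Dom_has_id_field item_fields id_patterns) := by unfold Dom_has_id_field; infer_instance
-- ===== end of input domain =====

-- B normalises field names and patterns into two lowercased sets built once and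
-- answers with one set-disjointness test instead of A's nested per-pattern scan (objective: simpler).

-- ===== PORT A =====
def has_id_field (item_fields : List (String × String)) (id_patterns : List String) : Bool :=
  if item_fields.isEmpty then false
  else
    -- field_names = set(item_fields.keys())
    let field_names : PySem.Set String := PySem.Set.ofList (item_fields.map (·.1))
    -- the early-return double loop: any pattern with an exact hit or a lowercased scan hit
    id_patterns.any (fun pattern =>
      PySem.Set.contains field_names pattern ||
      field_names.any (fun fn => PySem.Str.lower fn == PySem.Str.lower pattern))

-- ===== PORT B =====
def has_id_field_alt (item_fields : List (String × String)) (id_patterns : List String) : Bool :=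
  match item_fields with
  | [] => false
  | _ =>
    -- lowered_names = {fn.lower() for fn in item_fields}; lowered_patterns = {p.lower() for p in id_patterns}
    let lowered_names : PySem.Set String :=
      PySem.Set.ofList ((item_fields.map (·.1)).map PySem.Str.lower)
    let lowered_patterns : PySem.Set String :=
      PySem.Set.ofList (id_patterns.map PySem.Str.lower)
    -- not lowered_names.isdisjoint(lowered_patterns)
    !((lowered_names ∩ lowered_patterns).isEmpty)

-- ===== PRECONDITION & SPEC =====
def Spec_has_id_field (item_fields : List (String × String)) (id_patterns : List String) (out : Bool) : Prop := out = has_id_field_alt item_fields id_patterns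
instance (item_fields : List (String × String)) (id_patterns : List String) (out : Bool) : Decidable (Spec_has_id_field item_fields id_patterns out) := by unfold Spec_has_id_field; infer_instance

-- ===== CLAIM (what is proved, stated in full; the proofs are below) =====
def Claim_equal_has_id_field : Prop := ∀ (item_fields : List (String × String)) (id_patterns : List String), Dom_has_id_field item_fields id_patterns → Spec_has_id_field item_fields id_patterns (has_id_field item_fields id_patterns)

-- ===== LEMMAS AND PROOFS =====

theorem intersect_eq (names patterns : List String) :
    (patterns.any (fun p =>
      PySem.Set.contains (PySem.Set.ofList names) p ||
      (PySem.Set.ofList names).any (fun fn => PySem.Str.lower fn == PySem.Str.lower p)))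
    = !((PySem.Set.ofList (names.map PySem.Str.lower) ∩
          PySem.Set.ofList (patterns.map PySem.Str.lower)).isEmpty) := by
  rw [Bool.eq_iff_iff]
  simp only [List.any_eq_true, Bool.or_eq_true, List.contains_iff_mem,
    PySem.Set.mem_ofList, List.mem_map, beq_iff_eq, Bool.not_eq_true',
    List.isEmpty_eq_false_iff_exists_mem, PySem.Set.contains, List.mem_inter_iff]
  constructor
  · rintro ⟨p, hp, h | ⟨fn, hfn, he⟩⟩
    · exact ⟨PySem.Str.lower p, ⟨p, h, rfl⟩, ⟨p, hp, rfl⟩⟩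
    · exact ⟨PySem.Str.lower p, ⟨fn, hfn, he⟩, ⟨p, hp, rfl⟩⟩
  · rintro ⟨x, ⟨fn, hfn, hx⟩, ⟨p, hp, hx'⟩⟩
    exact ⟨p, hp, Or.inr ⟨fn, hfn, hx.trans hx'.symm⟩⟩

-- ===== VERDICT (by name: the statement is the Claim_ definition above) =====
theorem has_id_field_spec : Claim_equal_has_id_field := by
  intro item_fields id_patterns _
  unfold Spec_has_id_field has_id_field has_id_field_alt
  match item_fields with
  | [] => rfl
  | f :: fs => simpa using intersect_eq ((f :: fs).map (·.1)) id_patterns
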